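-- pv_equiv track=rewrite | github.com/piotrtt/road-gen-ai | src/generators/spatial_validator.py | _generate_param_combinations
-- ===== SOURCE A (Python) =====
-- from typing import List, Dict, Any, Tuple, Optional
--
-- def _generate_param_combinations(
--
--     param_dict: Dict[str, List[Any]],
--     max_count: int
-- ):
--     """Generate parameter combinations up to max_count."""
--     import itertools
--
--     keys = list(param_dict.keys())
--     values = [param_dict[k] for k in keys]
--
--     count = 0
--     for combo in itertools.product(*values):
--         if count >= max_count:
--             break
--         yield dict(zip(keys, combo))
--         count += 1
-- ===== SOURCE B (Python) =====
-- def _generate_param_combinations(param_dict, max_count):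
--     """Generate parameter combinations up to max_count by mixed-radix index decoding."""
--     keys = list(param_dict.keys())
--     values = [param_dict[k] for k in keys]
--
--     total = 1
--     for pool in values:
--         total *= len(pool)
--
--     rev_pools = values[::-1]
--     rev_lens = [len(pool) for pool in rev_pools]
--
--     limit = max(0, min(max_count, total))
--     for j in range(limit):
--         combo = []
--         rem = j
--         for pool, n in zip(rev_pools, rev_lens):
--             rem, q = divmod(rem, n)
--             combo.append(pool[q])
--         combo.reverse()
--         yield dict(zip(keys, combo))
-- ===== Notes on version B (the rewrite author's own statement) =====
-- stated objective: alternative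
-- what changed: Replaces the lazy itertools.product stream plus counting loop by closed-form mixed-radix decoding: it computes total = prod(len(pool)), clamps the yield count to max(0, min(max_count, total)), and reconstructs the j-th combination directly from its index with divmod over suffix products, in the same product order.
import Mathlib
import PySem

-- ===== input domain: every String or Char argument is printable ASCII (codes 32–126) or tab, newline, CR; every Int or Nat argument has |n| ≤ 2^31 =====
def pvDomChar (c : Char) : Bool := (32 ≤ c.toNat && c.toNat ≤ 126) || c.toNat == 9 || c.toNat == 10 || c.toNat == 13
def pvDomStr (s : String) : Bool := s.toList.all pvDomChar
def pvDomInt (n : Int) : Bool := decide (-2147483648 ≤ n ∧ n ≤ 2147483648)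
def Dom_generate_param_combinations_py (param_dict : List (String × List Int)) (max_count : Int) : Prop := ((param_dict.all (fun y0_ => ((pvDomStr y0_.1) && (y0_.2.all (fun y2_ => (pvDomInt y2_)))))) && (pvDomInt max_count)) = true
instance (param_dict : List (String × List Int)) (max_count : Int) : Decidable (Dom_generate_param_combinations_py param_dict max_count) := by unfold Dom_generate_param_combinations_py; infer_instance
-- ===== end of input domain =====

-- B replaces the itertools.product stream + counting loop by mixed-radix decoding of the combination index.

-- ===== PORT A =====
-- itertools.product(*values): fold over the pools, extending each partial tuple by each element of the pool
def pvProductA (values : List (List Int)) : List (List Int) :=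
  values.foldl (fun acc pool => acc.flatMap (fun t => pool.map (fun v => t ++ [v]))) [[]]

-- 'for combo in …: if count >= max_count: break; yield dict(zip(keys, combo)); count += 1'
def pvLoopA (keys : List String) (combos : List (List Int)) (count max_count : Int) : List (List (String × Int)) :=
  match combos with
  | [] => []
  | c :: rest =>
      if count ≥ max_count then []
      else (keys.zip c) :: pvLoopA keys rest (count + 1) max_count

def generate_param_combinations_py (param_dict : List (String × List Int)) (max_count : Int) : List (List (String × Int)) :=
  let keys := param_dict.map (·.1)
  let values := param_dict.map (·.2)
  pvLoopA keys (pvProductA values) 0 max_count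

-- ===== PORT B =====
-- 'total = 1; for pool in values: total *= len(pool)'
def pvTotalB (values : List (List Int)) : Nat :=
  values.foldl (fun t pool => t * pool.length) 1

-- 'rem = j; for pool in reversed(values): rem, q = divmod(rem, len(pool)); combo.append(pool[q])'
-- (rem, q are nonnegative Python ints, so Nat / and % are exact; whenever j < total the index
--  q is in range and getD's default 0 only makes the function total)
def pvDecodeStepB : List (List Int) → Nat → List Int
  | [], _ => []
  | pool :: rest, rem => pool.getD (rem % pool.length) 0 :: pvDecodeStepB rest (rem / pool.length)

-- 'limit = max(0, min(max_count, total)); for j in range(limit): …; combo.reverse(); yield dict(zip(keys, combo))'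
def generate_param_combinations_py_alt (param_dict : List (String × List Int)) (max_count : Int) : List (List (String × Int)) :=
  let keys := param_dict.map (·.1)
  let values := param_dict.map (·.2)
  let total := pvTotalB values
  let limit := (min max_count (total : Int)).toNat
  (List.range limit).map (fun j => keys.zip ((pvDecodeStepB values.reverse j).reverse))

-- ===== PRECONDITION & SPEC =====
def Spec_generate_param_combinations_py (param_dict : List (String × List Int)) (max_count : Int) (out : List (List (String × Int))) : Prop := out = generate_param_combinations_py_alt param_dict max_count
instance (param_dict : List (String × List Int)) (max_count : Int) (out : List (List (String × Int))) : Decidable (Spec_generate_param_combinations_py param_dict max_count out) := by unfold Spec_generate_param_combinations_py; infer_instance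

-- ===== CLAIM (what is proved, stated in full; the proofs are below) =====
def Claim_equal_generate_param_combinations_py : Prop := ∀ (param_dict : List (String × List Int)) (max_count : Int), Dom_generate_param_combinations_py param_dict max_count → Spec_generate_param_combinations_py param_dict max_count (generate_param_combinations_py param_dict max_count)

-- ===== LEMMAS AND PROOFS =====

-- proof-only helper: product of the pool lengths
def pvProdLen (values : List (List Int)) : Nat := (values.map List.length).prod

lemma pvTotalB_general (values : List (List Int)) (init : Nat) :
    values.foldl (fun t pool => t * pool.length) init = init * pvProdLen values := by
  induction values generalizing init with
  | nil => simp [pvProdLen]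
  | cons pool rest ih => simp [pvProdLen, ih, List.prod_cons] at *; ring

lemma pvTotalB_eq (values : List (List Int)) : pvTotalB values = pvProdLen values := by
  simp [pvTotalB, pvTotalB_general]

lemma pvProductA_snoc (values : List (List Int)) (pool : List Int) :
    pvProductA (values ++ [pool])
      = (pvProductA values).flatMap (fun t => pool.map (fun v => t ++ [v])) := by
  simp [pvProductA, List.foldl_append]

lemma length_pvProductA (values : List (List Int)) :
    (pvProductA values).length = pvProdLen values := by
  induction values using List.reverseRecOn with
  | nil => simp [pvProductA, pvProdLen]
  | append_singleton vs pool ih =>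
      rw [pvProductA_snoc]
      simp [pvProdLen, List.length_flatMap, ih] at *

-- indexing a flatMap whose blocks all have the same length L
lemma getD_flatMap_const {α β : Type} (xs : List α) (f : α → List β) (L : Nat)
    (hf : ∀ x ∈ xs, (f x).length = L) (j : Nat) (hj : j < xs.length * L) (d : α) (e : β) :
    (xs.flatMap f).getD j e = (f (xs.getD (j / L) d)).getD (j % L) e := by
  induction xs generalizing j with
  | nil => simp at hj
  | cons x rest ih =>
      have hL : 0 < L := by
        rcases Nat.eq_zero_or_pos L with h | h
        · rw [h, Nat.mul_zero] at hj; omega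
        · exact h
      have hx : (f x).length = L := hf x (by simp)
      rw [List.flatMap_cons]
      by_cases hjL : j < L
      · rw [List.getD_append _ _ _ _ (by rw [hx]; exact hjL),
            Nat.div_eq_of_lt hjL, Nat.mod_eq_of_lt hjL, List.getD_cons_zero]
      · rw [Nat.not_lt] at hjL
        rw [List.getD_append_right _ _ _ _ (by rw [hx]; exact hjL), hx]
        have hjsum : j < rest.length * L + L := by
          have h1 := hj
          simp [Nat.succ_mul] at h1
          omega
        have hrec := ih (fun y hy => hf y (by simp [hy])) (j - L) (by omega)
        rw [Nat.div_eq_sub_div hL hjL, Nat.mod_eq_sub_mod hjL, List.getD_cons_succ]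
        exact hrec

-- the j-th tuple of the product is the mixed-radix decoding of j
lemma getD_pvProductA (values : List (List Int)) (j : Nat) (hj : j < pvProdLen values) :
    (pvProductA values).getD j [] = (pvDecodeStepB values.reverse j).reverse := by
  induction values using List.reverseRecOn generalizing j with
  | nil =>
      have hj0 : j = 0 := by simp [pvProdLen] at hj; omega
      subst hj0
      simp [pvProductA, pvDecodeStepB]
  | append_singleton vs pool ih =>
      have hprod : pvProdLen (vs ++ [pool]) = pvProdLen vs * pool.length := by
        simp [pvProdLen]
      have hpool : 0 < pool.length := by
        rcases Nat.eq_zero_or_pos pool.length with h | h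
        · rw [hprod, h, Nat.mul_zero] at hj; omega
        · exact h
      rw [pvProductA_snoc]
      rw [getD_flatMap_const (pvProductA vs) _ pool.length
            (fun x _ => by simp) j
            (by rw [length_pvProductA, ← hprod]; exact hj) [] []]
      have hm : j % pool.length < pool.length := Nat.mod_lt _ hpool
      rw [List.getD_eq_getElem _ _ (by simpa using hm), List.getElem_map]
      have hdiv : j / pool.length < pvProdLen vs := by
        rw [hprod] at hj
        exact Nat.div_lt_of_lt_mul (by rw [Nat.mul_comm]; exact hj)
      have hrev : (vs ++ [pool]).reverse = pool :: vs.reverse := by simp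
      rw [hrev, pvDecodeStepB, List.reverse_cons]
      congr 1
      · exact ih _ hdiv
      · rw [List.getD_eq_getElem _ _ hm]

lemma pvLoopA_take (keys : List String) (combos : List (List Int)) (count max_count : Int) :
    pvLoopA keys combos count max_count
      = (combos.take (max_count - count).toNat).map (fun c => keys.zip c) := by
  induction combos generalizing count with
  | nil => simp [pvLoopA]
  | cons c rest ih =>
      by_cases h : count ≥ max_count
      · have : (max_count - count).toNat = 0 := by omega
        simp [pvLoopA, h, this]
      · have h1 : (max_count - count).toNat = (max_count - (count + 1)).toNat + 1 := by omega
        simp [pvLoopA, h, h1, ih]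

-- ===== VERDICT (by name: the statement is the Claim_ definition above) =====
theorem generate_param_combinations_py_spec : Claim_equal_generate_param_combinations_py := by
  intro param_dict max_count _
  unfold Spec_generate_param_combinations_py generate_param_combinations_py generate_param_combinations_py_alt
  simp only [pvLoopA_take, pvTotalB_eq, Int.sub_zero]
  set keys := param_dict.map (·.1)
  set values := param_dict.map (·.2)
  set T := pvProdLen values with hT
  apply List.ext_getElem
  · simp [length_pvProductA, ← hT]
    omega
  · intro i h1 h2
    simp only [List.getElem_map, List.getElem_take, List.getElem_range]
    have hiT : i < T := by
      simp [length_pvProductA, ← hT] at h1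
      omega
    have hdec := getD_pvProductA values i hiT
    rw [List.getD_eq_getElem _ _ (by rw [length_pvProductA]; exact hiT)] at hdec
    rw [hdec]
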